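-- pv_equiv track=rewrite | github.com/negativegluon/COM | multieval.py | most_common_elements
-- ===== SOURCE A (Python) =====
-- from collections import Counter
--
-- def most_common_elements(list_of_lists):
--     # 获取列表的长度
--     list_length = len(list_of_lists[0])
--
--     # 初始化结果列表
--     result = []
--
--     # 遍历每个位置
--     for i in range(list_length):
--         # 获取当前位置的所有元素
--         elements = [lst[i] for lst in list_of_lists]
--
--         # 统计每个元素的出现次数
--         counter = Counter(elements)
--
--         # 获取出现次数最多的元素
--         most_common_element = counter.most_common(1)[0][0]
--
--         # 将出现次数最多的元素添加到结果列表中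
--         result.append(most_common_element)
--
--     return result
-- ===== SOURCE B (Python) =====
-- def _bisect(sc, x, right):
--     # index of the first element of sorted sc that is >= x (right=False) / > x (right=True)
--     lo, hi = 0, len(sc)
--     while lo < hi:
--         mid = (lo + hi) // 2
--         if sc[mid] < x or (right and sc[mid] == x):
--             lo = mid + 1
--         else:
--             hi = mid
--     return lo
--
--
-- def most_common_elements(list_of_lists):
--     result = []
--     for i in range(len(list_of_lists[0])):
--         col = [lst[i] for lst in list_of_lists]
--         sc = sorted(col)
--         best, best_cnt = None, 0
--         for x in col:
--             c = _bisect(sc, x, True) - _bisect(sc, x, False)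
--             if c > best_cnt:
--                 best, best_cnt = x, c
--         result.append(best)
--     return result
-- ===== Notes on version B (the rewrite author's own statement) =====
-- stated objective: alternative
-- what changed: B drops the per-column Counter/most_common entirely: it sorts each column once and obtains every element's frequency from the sorted copy with a hand-written binary search (bisect_right - bisect_left), keeping a running first-strict-max over the column in original order (which reproduces most_common's first-insertion tie-break).
import Mathlib
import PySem

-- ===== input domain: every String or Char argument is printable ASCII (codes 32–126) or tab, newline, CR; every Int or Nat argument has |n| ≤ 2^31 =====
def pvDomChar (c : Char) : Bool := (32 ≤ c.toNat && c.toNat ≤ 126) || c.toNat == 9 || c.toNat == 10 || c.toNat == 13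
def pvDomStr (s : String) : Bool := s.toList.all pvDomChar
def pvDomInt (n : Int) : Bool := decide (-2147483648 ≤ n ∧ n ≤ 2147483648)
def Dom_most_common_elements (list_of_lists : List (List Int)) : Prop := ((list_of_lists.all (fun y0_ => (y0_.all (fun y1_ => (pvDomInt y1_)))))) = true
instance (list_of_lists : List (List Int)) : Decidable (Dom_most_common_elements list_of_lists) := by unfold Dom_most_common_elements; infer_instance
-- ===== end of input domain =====

-- B replaces A's per-column Counter + most_common by sorting each column and reading every
-- element's frequency off the sorted copy with a hand-written binary search, keeping a running
-- first-strict-max; alternative algorithm (sorted array + binary search instead of a hash counter).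

-- ===== PORT A =====
-- A-side helper: counter.most_common(1)[0][0].  CPython's Counter.most_common(1) is
-- heapq.nlargest(1, items, key=itemgetter(1)), which is exactly max(items, key) — the FIRST
-- item of maximal count in insertion order; PySem.List.max? is that max.  The .getD (0,0) is
-- unreachable under Pre_ (the counter is nonempty); Python raises IndexError there.
def pvMostCommon1 (counter : PySem.Dict Int Int) : Int :=
  ((PySem.List.max? counter.items (fun p => p.2)).getD (0, 0)).1

def most_common_elements (list_of_lists : List (List Int)) : List Int :=
  -- list_length = len(list_of_lists[0]); the .getD [] is unreachable under Pre_ (IndexError in Python)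
  let list_length : Nat := ((PySem.List.pyGet? list_of_lists 0).getD []).length
  (PySem.List.pyRange 0 (list_length : Int) 1).foldl (fun result i =>
    -- elements = [lst[i] for lst in list_of_lists]; the default 0 of pyGetD is unreachable under Pre_
    result ++ [pvMostCommon1 (PySem.Dict.counter
      (list_of_lists.map (fun lst => PySem.List.pyGetD lst i 0)))]) []

-- ===== PORT B =====
-- B-side helper: the hand-written binary search _bisect(sc, x, right): Python's while-loop on
-- (lo, hi) as structural recursion on hi - lo; lo, hi stay in 0..len(sc), so Nat is exact and
-- mid = (lo+hi)//2 is Nat division; sc[mid] is in range whenever lo < hi ≤ len(sc), so getD is exact.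
def pvBsr (sc : List Int) (x : Int) (right : Bool) (lo hi : Nat) : Nat :=
  if _h : lo < hi then
    let mid := (lo + hi) / 2
    if sc.getD mid 0 < x ∨ (right = true ∧ sc.getD mid 0 = x) then
      pvBsr sc x right (mid + 1) hi
    else
      pvBsr sc x right lo mid
  else lo
termination_by hi - lo
decreasing_by all_goals omega

-- B-side helper: _bisect(sc, x, right) with its initial lo, hi = 0, len(sc)
def pvBisect (sc : List Int) (x : Int) (right : Bool) : Nat := pvBsr sc x right 0 sc.length

def most_common_elements_alt (list_of_lists : List (List Int)) : List Int :=
  -- range(len(list_of_lists[0])); the .getD [] is unreachable under Pre_ (IndexError in Python)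
  (PySem.List.pyRange 0 ((((PySem.List.pyGet? list_of_lists 0).getD []).length : Int)) 1).foldl
    (fun result i =>
      -- col = [lst[i] for lst in list_of_lists]; pyGetD's default 0 unreachable under Pre_
      let col := list_of_lists.map (fun lst => PySem.List.pyGetD lst i 0)
      -- sc = sorted(col)
      let sc := PySem.List.sorted col (fun v => v)
      -- best, best_cnt = None, 0; for x in col: c = _bisect(..) - _bisect(..); if c > best_cnt: ...
      let best := col.foldl
        (fun (s : Option Int × Int) x =>
          let c : Int := (pvBisect sc x true : Int) - (pvBisect sc x false : Int)
          if s.2 < c then (some x, c) else s)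
        ((none : Option Int), (0 : Int))
      -- result.append(best); best is None only for an empty column, excluded by Pre_ (.getD 0 unreachable)
      result ++ [best.1.getD 0]) []

-- ===== PRECONDITION & SPEC =====
-- Pre_ excludes exactly the inputs where the Python raises IndexError: the empty outer list
-- (list_of_lists[0]) and rows shorter than the first row (lst[i]).
def Pre_most_common_elements (list_of_lists : List (List Int)) : Prop :=
  list_of_lists ≠ [] ∧ ∀ lst ∈ list_of_lists, (list_of_lists.headD []).length ≤ lst.length
instance (list_of_lists : List (List Int)) : Decidable (Pre_most_common_elements list_of_lists) := by
  unfold Pre_most_common_elements; infer_instance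

def pvWitness_most_common_elements : List (List Int) := [[0, 1], [0, 2]]

def Spec_most_common_elements (list_of_lists : List (List Int)) (out : List Int) : Prop := out = most_common_elements_alt list_of_lists
instance (list_of_lists : List (List Int)) (out : List Int) : Decidable (Spec_most_common_elements list_of_lists out) := by unfold Spec_most_common_elements; infer_instance

-- ===== CLAIM (what is proved, stated in full; the proofs are below) =====
def Claim_equal_most_common_elements : Prop := ∀ (list_of_lists : List (List Int)), Dom_most_common_elements list_of_lists → Pre_most_common_elements list_of_lists → Spec_most_common_elements list_of_lists (most_common_elements list_of_lists)

-- ===== LEMMAS AND PROOFS =====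

-- the step of Python's max(…, key) fold (PySem.List.max? IS this fold, definitionally)
def pvStep (key : Int → Int) (acc : Option Int) (x : Int) : Option Int :=
  match acc with
  | none => some x
  | some m => if key m < key x then some x else some m

lemma pvMax?_eq_foldl (xs : List Int) (key : Int → Int) :
    PySem.List.max? xs key = xs.foldl (pvStep key) none := by
  simp only [PySem.List.max?]
  exact PySem.List.foldl_congr_mem _ _ _ _ (fun acc x _ => by cases acc <;> rfl)

-- the fresh elements Set.add-folding appends to s
def pvExtra (s : PySem.Set Int) : List Int → List Int
  | [] => []
  | x :: xs => if PySem.Set.contains s x then pvExtra s xs else x :: pvExtra (PySem.Set.add s x) xs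

lemma pvFoldlAdd : ∀ (xs : List Int) (s : PySem.Set Int),
    xs.foldl PySem.Set.add s = s ++ pvExtra s xs := by
  intro xs
  induction xs with
  | nil => intro s; simp [pvExtra]
  | cons x t ih =>
      intro s
      simp only [List.foldl_cons]
      by_cases hx : x ∈ s
      · have hc : PySem.Set.contains s x = true := by
          simpa [PySem.Set.contains, List.contains_iff_mem] using hx
        have hadd : PySem.Set.add s x = s := by simp [PySem.Set.add, hx]
        rw [hadd, ih, pvExtra, hc]
        simp
      · have hc : ¬ PySem.Set.contains s x = true := by
          simpa [PySem.Set.contains, List.contains_iff_mem] using hx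
        rw [ih, pvExtra]
        simp only [hc, Bool.false_eq_true, if_false]
        have hadd : PySem.Set.add s x = s ++ [x] := by
          simp [PySem.Set.add, hx]
        rw [hadd]
        simp

-- skipping already-dominated duplicates does not change the first-strict-max fold
lemma pvExtraFold (key : Int → Int) : ∀ (xs : List Int) (s : PySem.Set Int) (acc : Option Int),
    (∀ y ∈ s, ∃ m, acc = some m ∧ key y ≤ key m) →
    (pvExtra s xs).foldl (pvStep key) acc = xs.foldl (pvStep key) acc := by
  intro xs
  induction xs with
  | nil => intro s acc _; rfl
  | cons x t ih =>
      intro s acc h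
      by_cases hc : PySem.Set.contains s x
      · have hx : x ∈ s := by
          simpa [PySem.Set.contains, List.contains_iff_mem] using hc
        obtain ⟨m, hm, hle⟩ := h x hx
        have hstep : pvStep key acc x = acc := by
          subst hm; simp [pvStep, not_lt.mpr hle]
        simp only [pvExtra, hc, if_true, List.foldl_cons, hstep]
        exact ih s acc h
      · simp only [pvExtra, hc, Bool.false_eq_true, if_false, List.foldl_cons]
        apply ih
        intro y hy
        have hxs : x ∉ s := by
          simpa [PySem.Set.contains, List.contains_iff_mem] using hc
        have hadd : PySem.Set.add s x = s ++ [x] := by simp [PySem.Set.add, hxs]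
        rw [hadd, List.mem_append, List.mem_singleton] at hy
        cases acc with
        | none =>
            rcases hy with hy | hy
            · obtain ⟨m, hm, _⟩ := h y hy; exact absurd hm (by simp)
            · exact ⟨x, rfl, by simp [hy]⟩
        | some m =>
            by_cases hmx : key m < key x
            · refine ⟨x, by simp [pvStep, hmx], ?_⟩
              rcases hy with hy | hy
              · obtain ⟨m', hm', hle⟩ := h y hy
                obtain rfl : m = m' := Option.some.inj hm'
                exact le_trans hle (le_of_lt hmx)
              · subst hy; exact le_refl _
            · refine ⟨m, by simp [pvStep, hmx], ?_⟩
              rcases hy with hy | hy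
              · obtain ⟨m', hm', hle⟩ := h y hy
                obtain rfl : m = m' := Option.some.inj hm'
                exact hle
              · subst hy; exact not_lt.mp hmx

-- max(…, key) over set(xs) in first-insertion order equals max(…, key) over xs itself
lemma pvMax?OfList (xs : List Int) (key : Int → Int) :
    PySem.List.max? (PySem.Set.ofList xs) key = PySem.List.max? xs key := by
  rw [pvMax?_eq_foldl, pvMax?_eq_foldl, PySem.Set.ofList_eq_foldl, pvFoldlAdd]
  simp only [List.nil_append]
  exact pvExtraFold key xs [] none (by simp)

-- max over a mapped list commutes with the map (Python max keeps the FIRST maximal element)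
lemma pv_max?_map {α β κ : Type} [LT κ] [DecidableLT κ] (f : α → β) (key : β → κ) (l : List α) :
    PySem.List.max? (l.map f) key = (PySem.List.max? l (fun a => key (f a))).map f := by
  simp only [PySem.List.max?, List.foldl_map]
  suffices h : ∀ acc : Option α,
      (List.foldl (fun acc x =>
        match acc with
        | none => some (f x)
        | some m => if key m < key (f x) then some (f x) else some m) (acc.map f) l)
      = (List.foldl (fun acc x =>
        match acc with
        | none => some x
        | some m => if key (f m) < key (f x) then some x else some m) acc l).map f by
    simpa using h none
  induction l with
  | nil => intro acc; rfl
  | cons x t ih =>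
      intro acc
      simp only [List.foldl_cons]
      have : (match acc.map f with
          | none => some (f x)
          | some m => if key m < key (f x) then some (f x) else some m)
          = (match acc with
          | none => some x
          | some m => if key (f m) < key (f x) then some x else some m).map f := by
        cases acc with
        | none => rfl
        | some m => simp only [Option.map_some]; split <;> simp
      rw [this, ih]

-- the _bisect predicate is downward/upward closed along a ≤-sorted list
lemma pvP_down (x : Int) (right : Bool) {y z : Int} (hyz : y ≤ z)
    (h : (decide (z < x ∨ right = true ∧ z = x)) = true) :
    (decide (y < x ∨ right = true ∧ y = x)) = true := by
  simp only [decide_eq_true_eq] at *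
  cases right <;> simp_all <;> omega

lemma pvP_up (x : Int) (right : Bool) {y z : Int} (hyz : z ≤ y)
    (h : ¬ (decide (z < x ∨ right = true ∧ z = x)) = true) :
    ¬ (decide (y < x ∨ right = true ∧ y = x)) = true := by
  simp only [decide_eq_true_eq] at *
  cases right <;> simp_all <;> omega

-- the binary search lands on countP of its predicate over the whole sorted list
lemma pvBsr_count (sc : List Int) (x : Int) (right : Bool)
    (hs : sc.Pairwise (· ≤ ·)) :
    ∀ (n lo hi : Nat), hi - lo ≤ n → lo ≤ hi → hi ≤ sc.length →
    (∀ k, k < lo → (decide (sc.getD k 0 < x ∨ right = true ∧ sc.getD k 0 = x)) = true) →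
    (∀ k, hi ≤ k → k < sc.length → ¬ (decide (sc.getD k 0 < x ∨ right = true ∧ sc.getD k 0 = x)) = true) →
    pvBsr sc x right lo hi = sc.countP (fun y => decide (y < x ∨ right = true ∧ y = x)) := by
  have hpw := List.pairwise_iff_getElem.mp hs
  intro n
  induction n with
  | zero =>
      intro lo hi hn hlh hhl h1 h2
      have : lo = hi := by omega
      subst this
      rw [pvBsr, dif_neg (by omega)]
      -- sc = take lo ++ drop lo; the prefix is all-true, the suffix all-false
      conv_rhs => rw [← List.take_append_drop lo sc]
      rw [List.countP_append]
      have hta : (List.take lo sc).countP (fun y => decide (y < x ∨ right = true ∧ y = x))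
          = (List.take lo sc).length := by
        rw [List.countP_eq_length]
        intro a ha
        obtain ⟨k, hk, rfl⟩ := List.mem_iff_getElem.mp ha
        have hk' : k < lo := by simp [List.length_take] at hk; omega
        have := h1 k hk'
        rw [List.getD_eq_getElem sc 0 (by omega)] at this
        simpa [List.getElem_take] using this
      have htd : (List.drop lo sc).countP (fun y => decide (y < x ∨ right = true ∧ y = x)) = 0 := by
        rw [List.countP_eq_zero]
        intro a ha
        obtain ⟨k, hk, rfl⟩ := List.mem_iff_getElem.mp ha
        have hlen : lo + k < sc.length := by
          have := hk; simp [List.length_drop] at this; omega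
        have := h2 (lo + k) (by omega) hlen
        rw [List.getD_eq_getElem sc 0 hlen] at this
        simpa [List.getElem_drop] using this
      rw [hta, htd, List.length_take]
      omega
  | succ n ih =>
      intro lo hi hn hlh hhl h1 h2
      by_cases hlt : lo < hi
      · rw [pvBsr, dif_pos hlt]
        have hmid1 : lo ≤ (lo + hi) / 2 := by omega
        have hmid2 : (lo + hi) / 2 < hi := by omega
        have hmlen : (lo + hi) / 2 < sc.length := by omega
        by_cases hcond : sc.getD ((lo + hi) / 2) 0 < x ∨ right = true ∧ sc.getD ((lo + hi) / 2) 0 = x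
        · rw [if_pos hcond]
          apply ih ((lo + hi) / 2 + 1) hi (by omega) (by omega) hhl _ h2
          intro k hk
          by_cases hklo : k < lo
          · exact h1 k hklo
          · -- lo ≤ k ≤ mid: sc[k] ≤ sc[mid], predicate downward closed
            have hkm : k ≤ (lo + hi) / 2 := by omega
            have hklen : k < sc.length := by omega
            have hle : sc.getD k 0 ≤ sc.getD ((lo + hi) / 2) 0 := by
              rw [List.getD_eq_getElem sc 0 hklen, List.getD_eq_getElem sc 0 hmlen]
              rcases Nat.lt_or_ge k ((lo + hi) / 2) with h | h
              · exact hpw k ((lo + hi) / 2) hklen hmlen h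
              · have : k = (lo + hi) / 2 := by omega
                subst this; exact le_refl _
            exact pvP_down x right hle (by simpa using hcond)
        · rw [if_neg hcond]
          apply ih lo ((lo + hi) / 2) (by omega) (by omega) (by omega) h1
          intro k hk hklen
          have hle : sc.getD ((lo + hi) / 2) 0 ≤ sc.getD k 0 := by
            rw [List.getD_eq_getElem sc 0 hklen, List.getD_eq_getElem sc 0 hmlen]
            rcases Nat.lt_or_ge ((lo + hi) / 2) k with h | h
            · exact hpw ((lo + hi) / 2) k hmlen hklen h
            · have : k = (lo + hi) / 2 := by omega
              subst this; exact le_refl _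
          exact pvP_up x right hle (by simpa using hcond)
      · have : lo = hi := by omega
        subst this
        exact ih lo lo (by omega) (le_refl _) hhl h1 h2

-- ≤-count splits as <-count plus the exact count
lemma pvCountSplit (sc : List Int) (x : Int) :
    sc.countP (fun y => decide (y < x ∨ y = x))
      = sc.countP (fun y => decide (y < x)) + sc.count x := by
  induction sc with
  | nil => simp
  | cons y t ih =>
      simp only [List.countP_cons, List.count_cons, ih]
      by_cases h1 : y < x <;> by_cases h2 : y = x <;>
        simp [h1, h2, beq_iff_eq] <;> omega

-- _bisect(sc, x, True) - _bisect(sc, x, False) is the multiplicity of x in sc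
lemma pvBisectCount (sc : List Int) (hs : sc.Pairwise (· ≤ ·)) (x : Int) :
    (pvBisect sc x true : Int) - (pvBisect sc x false : Int) = (sc.count x : Int) := by
  have ht := pvBsr_count sc x true hs sc.length 0 sc.length (by omega) (by omega) (le_refl _)
    (by intro k hk; omega) (by intro k hk hk'; omega)
  have hf := pvBsr_count sc x false hs sc.length 0 sc.length (by omega) (by omega) (le_refl _)
    (by intro k hk; omega) (by intro k hk hk'; omega)
  unfold pvBisect
  rw [ht, hf]
  have e1 : sc.countP (fun y => decide (y < x ∨ true = true ∧ y = x))
      = sc.countP (fun y => decide (y < x ∨ y = x)) := by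
    apply List.countP_congr; intro a _; simp
  have e2 : sc.countP (fun y => decide (y < x ∨ false = true ∧ y = x))
      = sc.countP (fun y => decide (y < x)) := by
    apply List.countP_congr; intro a _; simp
  rw [e1, e2, pvCountSplit]
  push_cast
  ring

-- the (best, best_cnt) pair carried by B's loop tracks the max? fold's state
def pvG (key : Int → Int) (o : Option Int) : Option Int × Int :=
  (o, match o with | none => 0 | some m => key m)

lemma pvPairFold (key : Int → Int) : ∀ (xs : List Int), (∀ x ∈ xs, 0 < key x) →
    ∀ (acc : Option Int),
    xs.foldl (fun s x => if s.2 < key x then (some x, key x) else s) (pvG key acc)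
      = pvG key (xs.foldl (pvStep key) acc) := by
  intro xs
  induction xs with
  | nil => intro _ acc; rfl
  | cons x t ih =>
      intro h acc
      simp only [List.foldl_cons]
      have hstep : (if (pvG key acc).2 < key x then (some x, key x) else pvG key acc)
          = pvG key (pvStep key acc x) := by
        cases acc with
        | none => simp [pvG, pvStep, h x (by simp)]
        | some m => simp only [pvG, pvStep]; split <;> simp
      rw [hstep]
      exact ih (fun y hy => h y (by simp [hy])) _

-- per column: A's Counter + most_common(1) equals B's sort + bisect + running strict max
lemma pvPerColumn (col : List Int) :
    pvMostCommon1 (PySem.Dict.counter col)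
      = (col.foldl
          (fun (s : Option Int × Int) x =>
            let c : Int := (pvBisect (PySem.List.sorted col (fun v => v)) x true : Int)
                         - (pvBisect (PySem.List.sorted col (fun v => v)) x false : Int)
            if s.2 < c then (some x, c) else s)
          ((none : Option Int), (0 : Int))).1.getD 0 := by
  have hs : (PySem.List.sorted col (fun v => v)).Pairwise (· ≤ ·) :=
    PySem.List.sorted_pairwise col (fun v => v)
  have hperm : (PySem.List.sorted col (fun v => v)).Perm col :=
    PySem.List.sorted_perm col (fun v => v) false
  -- B's loop computes key x = count of x in col at every element
  have hcongr : col.foldl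
      (fun (s : Option Int × Int) x =>
        let c : Int := (pvBisect (PySem.List.sorted col (fun v => v)) x true : Int)
                     - (pvBisect (PySem.List.sorted col (fun v => v)) x false : Int)
        if s.2 < c then (some x, c) else s)
      ((none : Option Int), (0 : Int))
      = col.foldl
      (fun (s : Option Int × Int) x =>
        if s.2 < (col.count x : Int) then (some x, (col.count x : Int)) else s)
      ((none : Option Int), (0 : Int)) := by
    apply PySem.List.foldl_congr_mem
    intro acc x _
    have := pvBisectCount (PySem.List.sorted col (fun v => v)) hs x
    rw [hperm.count_eq x] at this
    simp only [this]
  rw [hcongr]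
  -- B's pair fold is the max? fold
  have hpos : ∀ x ∈ col, 0 < ((col.count x : Nat) : Int) := by
    intro x hx
    have := List.count_pos_iff.mpr hx
    omega
  have hB := pvPairFold (fun v => (col.count v : Int)) col hpos none
  simp only [pvG] at hB
  rw [hB]
  -- A's side: items of the counter, then max? through the map, then over set(col) = over col
  unfold pvMostCommon1
  rw [PySem.Dict.items_counter,
    pv_max?_map (fun k => (k, (List.count k col : Int))) (fun p => p.2) (PySem.Set.ofList col)]
  rw [show (fun a => ((fun k => (k, (List.count k col : Int))) a).2)
      = (fun v => ((col.count v : Nat) : Int)) from rfl]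
  rw [pvMax?OfList col (fun v => ((col.count v : Nat) : Int)), pvMax?_eq_foldl]
  cases h : col.foldl (pvStep fun v => ((col.count v : Nat) : Int)) none with
  | none => simp
  | some m => simp

-- the two ports agree on EVERY input (outside Pre_ both read PySem defaults where Python raises)
lemma pvPortsEq (l : List (List Int)) :
    most_common_elements l = most_common_elements_alt l := by
  simp only [most_common_elements, most_common_elements_alt]
  rw [PySem.List.pyRange_zero_nat, List.foldl_map, List.foldl_map,
    PySem.List.foldl_append_singleton_eq_map
      (f := fun k => pvMostCommon1 (PySem.Dict.counter
        (l.map (fun lst => PySem.List.pyGetD lst ((k : Nat) : Int) 0)))),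
    PySem.List.foldl_append_singleton_eq_map]
  simp only [List.nil_append]
  apply List.map_congr_left
  intro k _
  exact pvPerColumn (l.map (fun lst => PySem.List.pyGetD lst ((k : Nat) : Int) 0))

-- ===== VERDICT (by name: the statement is the Claim_ definition above) =====
theorem most_common_elements_spec : Claim_equal_most_common_elements := by
  intro l _ _
  unfold Spec_most_common_elements
  exact pvPortsEq l
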